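-- pv_equiv track=rewrite | github.com/arpitguptaalm1-art/Project | backend/app.py | infer_job_requirements
-- ===== SOURCE A (Python) =====
-- def infer_job_requirements(dream_job):
--     job = dream_job.lower()
--
--     if any(word in job for word in ["engineer", "developer", "programmer"]):
--         return {"focus": 5, "career": 5, "health": 3}
--
--     if any(word in job for word in ["data", "scientist", "analyst", "ai"]):
--         return {"focus": 5, "career": 4, "health": 3}
--
--     if any(word in job for word in ["entrepreneur", "startup", "business", "founder"]):
--         return {"focus": 4, "career": 5, "health": 4}
--
--     if any(word in job for word in ["government", "ias", "ips", "upsc", "ssc"]):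
--         return {"focus": 4, "career": 4, "health": 3}
--
--     # fallback for ANY unknown job
--     return {"focus": 4, "career": 4, "health": 3}
-- ===== SOURCE B (Python) =====
-- # B: flat keyword->category map + min-aggregation (smallest category wins),
-- # then index into a requirements table; no ordered branch chain.
-- KEYWORD_CATEGORY = [
--     ("engineer", 0), ("developer", 0), ("programmer", 0),
--     ("data", 1), ("scientist", 1), ("analyst", 1), ("ai", 1),
--     ("entrepreneur", 2), ("startup", 2), ("business", 2), ("founder", 2),
--     ("government", 3), ("ias", 3), ("ips", 3), ("upsc", 3), ("ssc", 3),
-- ]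
-- REQUIREMENTS = [
--     {"focus": 5, "career": 5, "health": 3},
--     {"focus": 5, "career": 4, "health": 3},
--     {"focus": 4, "career": 5, "health": 4},
--     {"focus": 4, "career": 4, "health": 3},
--     {"focus": 4, "career": 4, "health": 3},  # no keyword matched
-- ]
--
-- def infer_job_requirements(dream_job):
--     job = dream_job.lower()
--     cat = min((c for w, c in KEYWORD_CATEGORY if w in job), default=4)
--     return REQUIREMENTS[cat]
-- ===== Notes on version B (the rewrite author's own statement) =====
-- stated objective: alternative
-- what changed: A's ordered if/any branch chain is replaced by a flat keyword-to-category map aggregated with min (the smallest matching category wins, which coincides with A's first-match order) followed by an index into a requirements table.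
import Mathlib
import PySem

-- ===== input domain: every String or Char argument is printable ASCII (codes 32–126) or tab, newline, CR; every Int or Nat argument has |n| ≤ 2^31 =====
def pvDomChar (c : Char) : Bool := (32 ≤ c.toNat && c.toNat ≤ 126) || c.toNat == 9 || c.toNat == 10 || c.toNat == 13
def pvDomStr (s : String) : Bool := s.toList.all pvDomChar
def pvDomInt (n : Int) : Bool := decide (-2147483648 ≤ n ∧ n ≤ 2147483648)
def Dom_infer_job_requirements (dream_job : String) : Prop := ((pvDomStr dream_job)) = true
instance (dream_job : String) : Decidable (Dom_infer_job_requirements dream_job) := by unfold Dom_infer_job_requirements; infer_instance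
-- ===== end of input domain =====

-- B replaces A's ordered if/any chain by a flat keyword→category map aggregated with min, then a table index (alternative; same cost).

-- ===== PORT A =====
def infer_job_requirements (dream_job : String) : List (String × Int) :=
  let job := PySem.Str.lower dream_job
  if (["engineer", "developer", "programmer"].any fun word => PySem.Str.isIn word job) then
    [("focus", 5), ("career", 5), ("health", 3)]
  else if (["data", "scientist", "analyst", "ai"].any fun word => PySem.Str.isIn word job) then
    [("focus", 5), ("career", 4), ("health", 3)]
  else if (["entrepreneur", "startup", "business", "founder"].any fun word => PySem.Str.isIn word job) then
    [("focus", 4), ("career", 5), ("health", 4)]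
  else if (["government", "ias", "ips", "upsc", "ssc"].any fun word => PySem.Str.isIn word job) then
    [("focus", 4), ("career", 4), ("health", 3)]
  else
    [("focus", 4), ("career", 4), ("health", 3)]

-- ===== PORT B =====
def pvKeywordCategory : List (String × Int) :=
  [ ("engineer", 0), ("developer", 0), ("programmer", 0)
  , ("data", 1), ("scientist", 1), ("analyst", 1), ("ai", 1)
  , ("entrepreneur", 2), ("startup", 2), ("business", 2), ("founder", 2)
  , ("government", 3), ("ias", 3), ("ips", 3), ("upsc", 3), ("ssc", 3) ]

def pvRequirements : List (List (String × Int)) :=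
  [ [("focus", 5), ("career", 5), ("health", 3)]
  , [("focus", 5), ("career", 4), ("health", 3)]
  , [("focus", 4), ("career", 5), ("health", 4)]
  , [("focus", 4), ("career", 4), ("health", 3)]
  , [("focus", 4), ("career", 4), ("health", 3)] ]

def infer_job_requirements_alt (dream_job : String) : List (String × Int) :=
  let job := PySem.Str.lower dream_job
  -- min(..., default=4) over the generator, as a fold
  let cat := pvKeywordCategory.foldl
    (fun acc p => if PySem.Str.isIn p.1 job then min acc p.2 else acc) 4
  -- REQUIREMENTS[cat]; cat ∈ [0,4] always, so the index is in range and the default is unreachable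
  (PySem.List.pyGet? pvRequirements cat).getD []

-- ===== PRECONDITION & SPEC =====
def Spec_infer_job_requirements (dream_job : String) (out : List (String × Int)) : Prop := out = infer_job_requirements_alt dream_job
instance (dream_job : String) (out : List (String × Int)) : Decidable (Spec_infer_job_requirements dream_job out) := by unfold Spec_infer_job_requirements; infer_instance

-- ===== CLAIM (what is proved, stated in full; the proofs are below) =====
def Claim_equal_infer_job_requirements : Prop := ∀ (dream_job : String), Dom_infer_job_requirements dream_job → Spec_infer_job_requirements dream_job (infer_job_requirements dream_job)

-- ===== LEMMAS AND PROOFS =====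

-- folding a group of keywords that all map to the same category c either lowers the
-- accumulator to min acc c (some keyword matches) or leaves it unchanged (none does)
theorem pv_fold_group (job : String) (ws : List String) (c acc : Int) :
    (ws.map (fun w => (w, c))).foldl
        (fun acc p => if PySem.Str.isIn p.1 job then min acc p.2 else acc) acc
      = if ws.any (fun w => PySem.Str.isIn w job) then min acc c else acc := by
  induction ws generalizing acc with
  | nil => simp
  | cons w ws ih =>
    simp only [List.map_cons, List.foldl_cons, List.any_cons]
    by_cases h : PySem.Str.isIn w job = true
    · rw [if_pos h, ih]
      simp only [h, Bool.true_or, if_true]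
      by_cases hany : (ws.any fun w => PySem.Str.isIn w job) = true
      · rw [if_pos hany, min_assoc, min_self]
      · rw [if_neg hany]
    · have h' : PySem.Str.isIn w job = false := by
        cases hh : PySem.Str.isIn w job
        · rfl
        · exact absurd hh h
      rw [if_neg h, ih]
      simp only [h', Bool.false_or]

-- ===== VERDICT (by name: the statement is the Claim_ definition above) =====
theorem infer_job_requirements_spec : Claim_equal_infer_job_requirements := by
  intro dream_job _
  show infer_job_requirements dream_job = infer_job_requirements_alt dream_job
  unfold infer_job_requirements infer_job_requirements_alt pvKeywordCategory
  set job := PySem.Str.lower dream_job with hjob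
  have e : ([ ("engineer", (0:Int)), ("developer", 0), ("programmer", 0)
    , ("data", 1), ("scientist", 1), ("analyst", 1), ("ai", 1)
    , ("entrepreneur", 2), ("startup", 2), ("business", 2), ("founder", 2)
    , ("government", 3), ("ias", 3), ("ips", 3), ("upsc", 3), ("ssc", 3) ]
    : List (String × Int))
    = (["engineer", "developer", "programmer"].map (fun w => (w, (0:Int))))
      ++ (["data", "scientist", "analyst", "ai"].map (fun w => (w, (1:Int))))
      ++ (["entrepreneur", "startup", "business", "founder"].map (fun w => (w, (2:Int))))
      ++ (["government", "ias", "ips", "upsc", "ssc"].map (fun w => (w, (3:Int)))) := by rfl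
  rw [e]
  simp only [List.foldl_append, pv_fold_group]
  by_cases h1 : (["engineer", "developer", "programmer"].any fun w => PySem.Str.isIn w job) = true <;>
  by_cases h2 : (["data", "scientist", "analyst", "ai"].any fun w => PySem.Str.isIn w job) = true <;>
  by_cases h3 : (["entrepreneur", "startup", "business", "founder"].any fun w => PySem.Str.isIn w job) = true <;>
  by_cases h4 : (["government", "ias", "ips", "upsc", "ssc"].any fun w => PySem.Str.isIn w job) = true <;>
    (try simp only [h1, h2, h3, h4]) <;> decide
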